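-- pv_equiv track=rewrite | github.com/FlamesX-128/adventjs | 2024/challenge-08/mod.py | draw_race
-- ===== SOURCE A (Python) =====
-- from typing import List
--
-- def draw_race(indices: List[int], length: int) -> str:
--     lanes = []
--
--     for index, position in enumerate(indices):
--         track = ["~"] * length
--
--         r_position = (length + position) % length
--         track[r_position] = "r"
--
--         track[0] = "~"
--
--         indentation = " " * (len(indices) - index - 1)
--
--         lane_str = f"{indentation}{''.join(track)} /{index + 1}"
--         lanes.append(lane_str)
--
--     return '\n'.join(map(str, lanes))
-- ===== SOURCE B (Python) =====
-- from typing import List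
--
-- def draw_race(indices: List[int], length: int) -> str:
--     # Column-major construction: sweep the columns of the race grid left to right,
--     # appending one character to every runner's buffer per column (a transposed build).
--     n = len(indices)
--     positions = [p % length for p in indices]
--     bufs = [[] for _ in positions]
--     for c in range(length):
--         for buf, p in zip(bufs, positions):
--             buf.append('r' if p == c != 0 else '~')
--     return '\n'.join(' ' * (n - 1 - i) + ''.join(b) + f' /{i + 1}' for i, b in enumerate(bufs))
-- ===== Notes on version B (the rewrite author's own statement) =====
-- stated objective: alternative
-- what changed: B builds the race column-major: it precomputes all modded positions and sweeps the columns of the grid left to right, appending one character per column to every runner's buffer (a transposed build), whereas A builds each row independently by mutating a fresh char list in place; same cost, different traversal order.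
import Mathlib
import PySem

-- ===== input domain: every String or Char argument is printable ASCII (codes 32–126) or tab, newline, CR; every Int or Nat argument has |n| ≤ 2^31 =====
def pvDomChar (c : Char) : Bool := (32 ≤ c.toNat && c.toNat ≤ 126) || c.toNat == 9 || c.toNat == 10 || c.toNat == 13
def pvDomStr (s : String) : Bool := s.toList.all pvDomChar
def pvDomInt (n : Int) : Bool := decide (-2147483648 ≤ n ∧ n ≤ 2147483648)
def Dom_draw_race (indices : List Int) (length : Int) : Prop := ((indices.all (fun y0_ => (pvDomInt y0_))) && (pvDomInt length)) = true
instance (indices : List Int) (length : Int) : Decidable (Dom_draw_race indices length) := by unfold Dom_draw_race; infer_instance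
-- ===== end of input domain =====

-- B builds the race column-major (all columns of the grid first, then a zip-fold transpose into
-- row tracks) instead of A's row-by-row mutation of a char list; same cost, different traversal.

-- ===== PORT A =====
-- Lane characters model A's list of one-character strings; track[i] = "c" is ported as List.set
-- at i.toNat, exact because Pre_ guarantees 0 ≤ r_position < length = track length.
def draw_race (indices : List Int) (length : Int) : String :=
  let lanes : List String :=
    (PySem.List.enumerate indices).foldl (fun lanes ip =>
      let index := ip.1
      let position := ip.2
      let track := PySem.List.pyRepeat ['~'] length
      let r_position := PySem.Int.mod (length + position) length
      let track := track.set r_position.toNat 'r'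
      let track := track.set 0 '~'
      let indentation := PySem.List.pyRepeat [' '] ((indices.length : Int) - index - 1)
      let lane_str := String.mk (indentation ++ track ++ ' ' :: '/' :: PySem.Int.toChars (index + 1))
      lanes ++ [lane_str]) []
  PySem.Str.join "\n" lanes

-- ===== PORT B =====
def draw_race_alt (indices : List Int) (length : Int) : String :=
  let n := indices.length
  let positions := indices.map (fun p => PySem.Int.mod p length)
  let bufs := (PySem.List.pyRange 0 length 1).foldl
    (fun bufs c => (bufs.zip positions).map (fun bp =>
      bp.1 ++ [if bp.2 = c ∧ c ≠ 0 then 'r' else '~']))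
    (positions.map (fun _ => ([] : List Char)))
  PySem.Str.join "\n"
    ((PySem.List.enumerate bufs).map (fun it =>
      String.mk (PySem.List.pyRepeat [' '] ((n : Int) - 1 - it.1) ++ it.2 ++
        ' ' :: '/' :: PySem.Int.toChars (it.1 + 1))))

-- ===== PRECONDITION & SPEC =====
-- Pre_ excludes exactly the inputs where A raises: with nonempty indices, length = 0 hits
-- ZeroDivisionError in '% length' and length < 0 hits IndexError on the empty track.
def Pre_draw_race (indices : List Int) (length : Int) : Prop := indices = [] ∨ 0 < length
instance (indices : List Int) (length : Int) : Decidable (Pre_draw_race indices length) := by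
  unfold Pre_draw_race; infer_instance
def pvWitness_draw_race : List Int × Int := ([0, 5, -3], 10)
def Spec_draw_race (indices : List Int) (length : Int) (out : String) : Prop := out = draw_race_alt indices length
instance (indices : List Int) (length : Int) (out : String) : Decidable (Spec_draw_race indices length out) := by unfold Spec_draw_race; infer_instance

-- ===== CLAIM (what is proved, stated in full; the proofs are below) =====
def Claim_equal_draw_race : Prop := ∀ (indices : List Int) (length : Int), Dom_draw_race indices length → Pre_draw_race indices length → Spec_draw_race indices length (draw_race indices length)

-- ===== LEMMAS AND PROOFS =====

-- setting index k < n of a constant list splits it around the new element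
theorem set_replicate_split {α : Type} (a b : α) :
    ∀ (n k : Nat), k < n →
      (List.replicate n a).set k b = List.replicate k a ++ b :: List.replicate (n - k - 1) a := by
  intro n
  induction n with
  | zero => intro k h; omega
  | succ m ih =>
    intro k h
    cases k with
    | zero => simp [List.replicate_succ]
    | succ j =>
      simp only [List.replicate_succ, List.set_cons_succ, List.cons_append, List.cons.injEq,
        true_and]
      have := ih j (by omega)
      simpa using this

-- mapping a function that is constant on a list yields a replicate
theorem map_eq_replicate {α β : Type} (f : α → β) (d : β) :
    ∀ (l : List α), (∀ x ∈ l, f x = d) → l.map f = List.replicate l.length d := by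
  intro l
  induction l with
  | nil => intro _; rfl
  | cons x xs ih =>
    intro h
    simp [List.replicate_succ, h x (by simp), ih (fun y hy => h y (by simp [hy]))]

-- A's two in-place writes produce exactly B's branched track
theorem track_eq (L p : Int) (hL : 0 < L) :
    ((PySem.List.pyRepeat ['~'] L).set (PySem.Int.mod (L + p) L).toNat 'r').set 0 '~'
      = (if PySem.Int.mod p L = 0 then PySem.List.pyRepeat ['~'] L
         else PySem.List.pyRepeat ['~'] (PySem.Int.mod p L) ++
              'r' :: PySem.List.pyRepeat ['~'] (L - PySem.Int.mod p L - 1)) := by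
  have hmods : PySem.Int.mod (L + p) L = PySem.Int.mod p L := by
    rw [PySem.Int.mod_eq_emod_of_pos hL, PySem.Int.mod_eq_emod_of_pos hL,
      show L + p = p + L * 1 by ring, Int.add_mul_emod_self_left]
  rw [hmods]
  have h0 : 0 ≤ PySem.Int.mod p L := by
    rw [PySem.Int.mod_eq_emod_of_pos hL]; exact Int.emod_nonneg _ (by omega)
  have hlt : PySem.Int.mod p L < L := by
    rw [PySem.Int.mod_eq_emod_of_pos hL]; exact Int.emod_lt_of_pos _ hL
  set m := PySem.Int.mod p L with hm
  simp only [PySem.List.pyRepeat_singleton]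
  have hkn : m.toNat < L.toNat := by omega
  by_cases hz : m = 0
  · rw [hz, Int.toNat_zero, List.set_set, if_pos rfl]
    obtain ⟨j, hj⟩ : ∃ j, L.toNat = j + 1 := ⟨L.toNat - 1, by omega⟩
    rw [hj, List.replicate_succ, List.set_cons_zero]
  · rw [if_neg hz]
    rw [set_replicate_split '~' 'r' L.toNat m.toNat hkn]
    obtain ⟨j, hj⟩ : ∃ j, m.toNat = j + 1 := ⟨m.toNat - 1, by omega⟩
    rw [hj, List.replicate_succ, List.cons_append, List.set_cons_zero]
    have h1 : (L - m - 1).toNat = L.toNat - (j + 1) - 1 := by omega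
    rw [h1, List.cons_append]

-- the column-character map over [0, L) IS the branched track
theorem trackOf_eq (L m : Int) (h0 : 0 ≤ m) (hlt : m < L) :
    (PySem.List.pyRange 0 L 1).map (fun c => if (m = c ∧ c ≠ 0) then 'r' else '~')
      = (if m = 0 then List.replicate L.toNat '~'
         else List.replicate m.toNat '~' ++ 'r' :: List.replicate (L - m - 1).toNat '~') := by
  by_cases hz : m = 0
  · subst hz
    rw [if_pos rfl]
    have := map_eq_replicate (fun c : Int => if ((0 : Int) = c ∧ c ≠ 0) then 'r' else '~') '~'
      (PySem.List.pyRange 0 L 1) (by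
        intro c _
        by_cases h : (0 : Int) = c
        · simp [← h]
        · simp [h])
    rw [this, PySem.List.length_pyRange_one]
    norm_num
  · rw [if_neg hz]
    rw [PySem.List.pyRange_one_append 0 m L h0 (le_of_lt hlt)]
    rw [PySem.List.pyRange_one_cons hlt]
    rw [List.map_append, List.map_cons]
    have p1 : (PySem.List.pyRange 0 m 1).map (fun c => if (m = c ∧ c ≠ 0) then 'r' else '~')
        = List.replicate m.toNat '~' := by
      rw [map_eq_replicate _ '~' _ (by
        intro c hc
        rw [PySem.List.mem_pyRange_one] at hc
        have : m ≠ c := by omega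
        simp [this]), PySem.List.length_pyRange_one]
      norm_num
    have p2 : (if (m = m ∧ m ≠ 0) then 'r' else '~') = 'r' := by simp [hz]
    have p3 : (PySem.List.pyRange (m + 1) L 1).map (fun c => if (m = c ∧ c ≠ 0) then 'r' else '~')
        = List.replicate (L - m - 1).toNat '~' := by
      rw [map_eq_replicate _ '~' _ (by
        intro c hc
        rw [PySem.List.mem_pyRange_one] at hc
        have : m ≠ c := by omega
        simp [this]), PySem.List.length_pyRange_one]
      congr 1
      omega
    rw [p1, p2, p3]

-- the columnwise zip-sweep is a transpose: each row p accumulates its own character per column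
theorem foldl_zip_cols {ps : List Int} (g : Int → Int → Char) :
    ∀ (cs : List Int) (h : Int → List Char),
      cs.foldl (fun ts c => ((ts.zip ps).map (fun bp => bp.1 ++ [g c bp.2]))) (ps.map h)
      = ps.map (fun p => h p ++ cs.map (fun c => g c p)) := by
  intro cs
  induction cs with
  | nil => intro h; simp
  | cons c cs ih =>
    intro h
    simp only [List.foldl_cons, List.map_cons]
    have hz : ∀ (l : List Int), ((l.map h).zip l).map (fun bp => bp.1 ++ [g c bp.2])
        = l.map (fun p => h p ++ [g c p]) := by
      intro l
      induction l with
      | nil => rfl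
      | cons x xs ihx => simp [ihx]
    rw [hz ps, ih (fun p => h p ++ [g c p])]
    simp

-- enumerate commutes with map on the values
theorem enumerate_map {α β : Type} (f : α → β) :
    ∀ (xs : List α) (s : Int),
      PySem.List.enumerate (xs.map f) s
        = (PySem.List.enumerate xs s).map (fun p => (p.1, f p.2)) := by
  intro xs
  induction xs with
  | nil => intro s; simp [PySem.List.enumerate_nil]
  | cons x xs ih => intro s; simp [PySem.List.enumerate_cons, ih]

theorem draw_race_spec_aux (indices : List Int) (length : Int)
    (h : Pre_draw_race indices length) :
    draw_race indices length = draw_race_alt indices length := by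
  simp only [draw_race, draw_race_alt]
  rw [PySem.List.foldl_append_singleton_eq_map
    (f := fun ip : Int × Int =>
      String.mk (PySem.List.pyRepeat [' '] ((indices.length : Int) - ip.1 - 1) ++
        (((PySem.List.pyRepeat ['~'] length).set (PySem.Int.mod (length + ip.2) length).toNat 'r').set 0 '~') ++
        ' ' :: '/' :: PySem.Int.toChars (ip.1 + 1)))]
  rw [List.nil_append]
  rw [foldl_zip_cols (fun c p => if p = c ∧ c ≠ 0 then 'r' else '~')]
  rw [List.map_map]
  rw [enumerate_map]
  rw [List.map_map]
  refine congrArg (PySem.Str.join "\n") (List.map_congr_left ?_)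
  intro ip hmem
  have hne : indices ≠ [] := by
    intro hnil
    rw [hnil] at hmem
    simp [PySem.List.enumerate_nil] at hmem
  have hL : 0 < length := by
    rcases h with h | h
    · exact absurd h hne
    · exact h
  simp only [Function.comp]
  have hind : ((indices.length : Int) - ip.1 - 1) = ((indices.length : Int) - 1 - ip.1) := by ring
  rw [hind, track_eq length ip.2 hL]
  simp only [List.nil_append, PySem.List.pyRepeat_singleton]
  rw [← trackOf_eq length (PySem.Int.mod ip.2 length)
    (by rw [PySem.Int.mod_eq_emod_of_pos hL]; exact Int.emod_nonneg _ (by omega))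
    (by rw [PySem.Int.mod_eq_emod_of_pos hL]; exact Int.emod_lt_of_pos _ hL)]

-- ===== VERDICT (by name: the statement is the Claim_ definition above) =====
theorem draw_race_spec : Claim_equal_draw_race := by
  intro indices length _ hpre
  exact draw_race_spec_aux indices length hpre
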